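-- pv_equiv track=rewrite | github.com/kommade/aoc-2025 | 12/solution.py | get_shape_rotations_and_flips
-- ===== SOURCE A (Python) =====
-- def get_shape_rotations_and_flips(shape):
--     base = normalize(shape)
--     seen = set()
--     variants = []
--     current = base
--     for _ in range(4):
--         for oriented in (current, flip_horizontal(current)):
--             key = tuple(oriented)
--             if key not in seen:
--                 seen.add(key)
--                 variants.append(oriented)
--         current = rotate90(current)
--     return variants
--
-- def normalize(shape):
--     min_r = min(r for r, _ in shape)
--     min_c = min(c for _, c in shape)
--     return sorted((r - min_r, c - min_c) for r, c in shape)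
--
-- def rotate90(shape):
--     return normalize([(c, -r) for r, c in shape])
--
-- def flip_horizontal(shape):
--     return normalize([(r, -c) for r, c in shape])
-- ===== SOURCE B (Python) =====
-- def get_shape_rotations_and_flips(shape):
--     # Fixed list of the eight dihedral coordinate transforms, applied directly to
--     # the input shape (normalize is translation-invariant, so normalizing each
--     # transformed copy once gives A's oriented shapes in A's emission order).
--     def norm(pts):
--         mr = min(p[0] for p in pts)
--         mc = min(p[1] for p in pts)
--         return sorted((r - mr, c - mc) for r, c in pts)
--     variants = []
--     for t in ((lambda r, c: (r, c)), (lambda r, c: (r, -c)),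
--               (lambda r, c: (c, -r)), (lambda r, c: (c, r)),
--               (lambda r, c: (-r, -c)), (lambda r, c: (-r, c)),
--               (lambda r, c: (-c, r)), (lambda r, c: (-c, -r))):
--         oriented = norm([t(r, c) for r, c in shape])
--         if oriented not in variants:
--             variants.append(oriented)
--     return variants
-- ===== Notes on version B (the rewrite author's own statement) =====
-- stated objective: alternative
-- what changed: B replaces A's maintained `current` state with its rotate90/flip-composition loop by a fixed list of the eight closed-form dihedral coordinate transforms applied directly to the input shape (normalize is translation-invariant), deduplicating by list membership instead of a seen-set.
import Mathlib
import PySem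

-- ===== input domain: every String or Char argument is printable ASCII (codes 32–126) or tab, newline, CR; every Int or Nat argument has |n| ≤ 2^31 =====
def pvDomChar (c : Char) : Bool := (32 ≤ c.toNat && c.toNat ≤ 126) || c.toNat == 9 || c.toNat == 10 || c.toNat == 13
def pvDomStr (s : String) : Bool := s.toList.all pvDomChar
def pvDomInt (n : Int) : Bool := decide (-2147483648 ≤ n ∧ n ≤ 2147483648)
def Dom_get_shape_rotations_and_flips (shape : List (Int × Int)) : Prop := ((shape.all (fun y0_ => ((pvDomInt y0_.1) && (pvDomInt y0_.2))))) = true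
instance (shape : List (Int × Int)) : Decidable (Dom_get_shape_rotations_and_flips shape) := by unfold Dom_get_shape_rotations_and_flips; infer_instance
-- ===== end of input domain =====

-- B replaces A's maintained rotate/flip state with the eight closed-form dihedral transforms
-- applied once each to the input shape (objective: alternative / more idiomatic; not faster).

-- ===== PORT A =====
-- normalize(shape); Python's min() raises ValueError on an empty list, so the `.getD 0`
-- defaults are unreachable under Pre_ (shape ≠ []); sorted over pairs = Python's lexicographic
-- tuple order, keyed through toLex.
def pvNormA (s : List (Int × Int)) : List (Int × Int) :=
  let mr := (PySem.List.min? (s.map Prod.fst) (fun x => x)).getD 0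
  let mc := (PySem.List.min? (s.map Prod.snd) (fun x => x)).getD 0
  PySem.List.sorted (s.map (fun p => (p.1 - mr, p.2 - mc))) (fun p => toLex p)

def pvRot90A (s : List (Int × Int)) : List (Int × Int) :=
  pvNormA (s.map (fun p => (p.2, -p.1)))

def pvFlipA (s : List (Int × Int)) : List (Int × Int) :=
  pvNormA (s.map (fun p => (p.1, -p.2)))

-- body of A's inner `for oriented in …` loop
def pvStepA (st : PySem.Set (List (Int × Int)) × List (List (Int × Int)))
    (oriented : List (Int × Int)) : PySem.Set (List (Int × Int)) × List (List (Int × Int)) :=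
  if PySem.Set.contains st.1 oriented then st else (PySem.Set.add st.1 oriented, st.2 ++ [oriented])

def get_shape_rotations_and_flips (shape : List (Int × Int)) : List (List (Int × Int)) :=
  let base := pvNormA shape
  let fin := (PySem.List.pyRange 0 4 1).foldl
    (fun st _ =>
      let sv := [st.2.2, pvFlipA st.2.2].foldl pvStepA (st.1, st.2.1)
      (sv.1, sv.2, pvRot90A st.2.2))
    ((PySem.Set.empty : PySem.Set (List (Int × Int))), ([] : List (List (Int × Int))), base)
  fin.2.1

-- ===== PORT B =====
def pvNormB (pts : List (Int × Int)) : List (Int × Int) :=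
  let mr := (PySem.List.min? (pts.map Prod.fst) (fun x => x)).getD 0
  let mc := (PySem.List.min? (pts.map Prod.snd) (fun x => x)).getD 0
  PySem.List.sorted (pts.map (fun p => (p.1 - mr, p.2 - mc))) (fun p => toLex p)

def pvTransforms : List ((Int × Int) → (Int × Int)) :=
  [fun p => (p.1, p.2), fun p => (p.1, -p.2), fun p => (p.2, -p.1), fun p => (p.2, p.1),
   fun p => (-p.1, -p.2), fun p => (-p.1, p.2), fun p => (-p.2, p.1), fun p => (-p.2, -p.1)]

def get_shape_rotations_and_flips_alt (shape : List (Int × Int)) : List (List (Int × Int)) :=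
  pvTransforms.foldl
    (fun variants t =>
      let oriented := pvNormB (shape.map t)
      if oriented ∈ variants then variants else variants ++ [oriented]) []

-- ===== PRECONDITION & SPEC =====
-- Pre_ excludes only the empty shape, on which Python's min() raises ValueError (in A and in B).
def Pre_get_shape_rotations_and_flips (shape : List (Int × Int)) : Prop := shape ≠ []
instance (shape : List (Int × Int)) : Decidable (Pre_get_shape_rotations_and_flips shape) := by
  unfold Pre_get_shape_rotations_and_flips; infer_instance
def pvWitness_get_shape_rotations_and_flips : (List (Int × Int)) := [(0, 0), (0, 1), (1, 0)]

def Spec_get_shape_rotations_and_flips (shape : List (Int × Int)) (out : List (List (Int × Int))) : Prop := out = get_shape_rotations_and_flips_alt shape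
instance (shape : List (Int × Int)) (out : List (List (Int × Int))) : Decidable (Spec_get_shape_rotations_and_flips shape out) := by unfold Spec_get_shape_rotations_and_flips; infer_instance

-- ===== CLAIM (what is proved, stated in full; the proofs are below) =====
def Claim_equal_get_shape_rotations_and_flips : Prop := ∀ (shape : List (Int × Int)), Dom_get_shape_rotations_and_flips shape → Pre_get_shape_rotations_and_flips shape → Spec_get_shape_rotations_and_flips shape (get_shape_rotations_and_flips shape)

-- ===== LEMMAS AND PROOFS =====

theorem pvNormB_eq (s : List (Int × Int)) : pvNormB s = pvNormA s := rfl

-- min() sees only the multiset of its argument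
theorem pv_min?_perm (xs ys : List Int) (h : xs.Perm ys) :
    PySem.List.min? xs (fun x => x) = PySem.List.min? ys (fun x => x) := by
  cases hx : PySem.List.min? xs (fun x => x) with
  | none =>
    have hxs : xs = [] := by rwa [PySem.List.min?_eq_none_iff] at hx
    subst hxs
    have hys : ys = [] := (List.perm_nil.mp h.symm)
    subst hys
    rfl
  | some m =>
    cases hy : PySem.List.min? ys (fun x => x) with
    | none =>
      have hys : ys = [] := by rwa [PySem.List.min?_eq_none_iff] at hy
      subst hys
      have hxs : xs = [] := List.perm_nil.mp h
      subst hxs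
      simp [show PySem.List.min? ([] : List Int) (fun x => x) = none from rfl] at hx
    | some m' =>
      have h1 := PySem.List.min?_isMin hx
      have h2 := PySem.List.min?_isMin hy
      have hm : m ∈ xs := PySem.List.min?_mem hx
      have hm' : m' ∈ ys := PySem.List.min?_mem hy
      have : m = m' := le_antisymm (h1 m' (h.mem_iff.mpr hm')) (h2 m (h.mem_iff.mp hm))
      rw [this]

-- normalize sees only the multiset of its argument
theorem pvNormA_perm (xs ys : List (Int × Int)) (h : xs.Perm ys) : pvNormA xs = pvNormA ys := by
  unfold pvNormA
  rw [pv_min?_perm _ _ (h.map Prod.fst), pv_min?_perm _ _ (h.map Prod.snd)]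
  exact PySem.List.sorted_eq_sorted_of_perm _ _ _ (toLex.injective) (h.map _)

theorem pv_foldl_min_add (t : List Int) : ∀ (x u : Int),
    (t.map (fun r => r + u)).foldl min (x + u) = t.foldl min x + u := by
  induction t with
  | nil => intro x u; simp
  | cons a t ih =>
    intro x u
    simp only [List.map_cons, List.foldl_cons]
    rw [min_add_add_right, ih]

-- normalize is translation-invariant
theorem pvNormA_shift (s : List (Int × Int)) (u v : Int) :
    pvNormA (s.map (fun p => (p.1 + u, p.2 + v))) = pvNormA s := by
  cases s with
  | nil => rfl
  | cons x t =>
    unfold pvNormA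
    have hfst : ((x :: t).map (fun p : Int × Int => (p.1 + u, p.2 + v))).map Prod.fst
        = ((x :: t).map Prod.fst).map (fun r => r + u) := by
      simp [List.map_map, Function.comp]
    have hsnd : ((x :: t).map (fun p : Int × Int => (p.1 + u, p.2 + v))).map Prod.snd
        = ((x :: t).map Prod.snd).map (fun r => r + v) := by
      simp [List.map_map, Function.comp]
    rw [hfst, hsnd]
    simp only [List.map_cons, PySem.List.min?_id_cons, Option.getD_some, pv_foldl_min_add]
    congr 1
    simp only [List.map_map]
    congr 1
    · simp only [Prod.mk.injEq]
      constructor <;> ring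
    · refine List.map_congr_left ?_
      intro p _
      simp only [Function.comp_apply, Prod.mk.injEq]
      constructor <;> ring

-- the crux: for an additive transform t, normalizing before applying t does not change
-- the normalized result
theorem pvNormA_map_norm (t : (Int × Int) → (Int × Int))
    (ht : ∀ p q : Int × Int, t (p.1 + q.1, p.2 + q.2) = ((t p).1 + (t q).1, (t p).2 + (t q).2))
    (s : List (Int × Int)) :
    pvNormA ((pvNormA s).map t) = pvNormA (s.map t) := by
  cases s with
  | nil => rfl
  | cons x t0 =>
    set s := x :: t0 with hs
    -- pvNormA s is a permutation of the shifted list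
    have hperm : (pvNormA s).Perm
        (s.map (fun p => (p.1 - ((PySem.List.min? (s.map Prod.fst) (fun x => x)).getD 0),
                          p.2 - ((PySem.List.min? (s.map Prod.snd) (fun x => x)).getD 0)))) := by
      unfold pvNormA
      exact PySem.List.sorted_perm _ _ _
    set mr := (PySem.List.min? (s.map Prod.fst) (fun x => x)).getD 0 with hmr
    set mc := (PySem.List.min? (s.map Prod.snd) (fun x => x)).getD 0 with hmc
    have h1 : pvNormA ((pvNormA s).map t)
        = pvNormA ((s.map (fun p => (p.1 - mr, p.2 - mc))).map t) :=
      pvNormA_perm _ _ (hperm.map t)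
    rw [h1]
    have h2 : (s.map (fun p => (p.1 - mr, p.2 - mc))).map t
        = (s.map t).map (fun q => (q.1 + (t (-mr, -mc)).1, q.2 + (t (-mr, -mc)).2)) := by
      simp only [List.map_map]
      refine List.map_congr_left ?_
      intro p _
      simp only [Function.comp]
      have : (p.1 - mr, p.2 - mc) = (p.1 + (-mr, -mc).1, p.2 + (-mr, -mc).2) := by
        simp; constructor <;> ring
      rw [this, ht p (-mr, -mc)]
    rw [h2, pvNormA_shift]

-- A's dedup loop with a `seen` set equals B's dedup loop by list membership,
-- given that `seen` and `variants` hold the same elements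
theorem pv_dedup_loop (os : List (List (Int × Int))) :
    ∀ (seen : PySem.Set (List (Int × Int))) (vs : List (List (Int × Int))),
    (∀ x, x ∈ seen ↔ x ∈ vs) →
    (os.foldl pvStepA (seen, vs)).2
      = os.foldl (fun variants o => if o ∈ variants then variants else variants ++ [o]) vs := by
  induction os with
  | nil => intro seen vs _; rfl
  | cons o os ih =>
    intro seen vs hinv
    simp only [List.foldl_cons]
    unfold pvStepA
    by_cases hmem : o ∈ vs
    · rw [if_pos ((PySem.Set.contains_iff _ _).mpr ((hinv o).mpr hmem)), if_pos hmem]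
      exact ih seen vs hinv
    · have hns : ¬ PySem.Set.contains seen o = true := fun hc =>
        hmem ((hinv o).mp ((PySem.Set.contains_iff _ _).mp hc))
      rw [if_neg hns, if_neg hmem]
      refine ih _ _ ?_
      intro x
      rw [PySem.Set.mem_add, List.mem_append, hinv x, List.mem_singleton]

-- the eight oriented shapes A emits, in emission order
def pvOrients (shape : List (Int × Int)) : List (List (Int × Int)) :=
  [pvNormA shape,
   pvFlipA (pvNormA shape),
   pvRot90A (pvNormA shape),
   pvFlipA (pvRot90A (pvNormA shape)),
   pvRot90A (pvRot90A (pvNormA shape)),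
   pvFlipA (pvRot90A (pvRot90A (pvNormA shape))),
   pvRot90A (pvRot90A (pvRot90A (pvNormA shape))),
   pvFlipA (pvRot90A (pvRot90A (pvRot90A (pvNormA shape))))]

theorem pvA_fold (shape : List (Int × Int)) :
    get_shape_rotations_and_flips shape
      = ((pvOrients shape).foldl pvStepA ((PySem.Set.empty : PySem.Set (List (Int × Int))), [])).2 := by
  have hr : PySem.List.pyRange 0 4 1 = [0, 1, 2, 3] := by decide
  simp only [get_shape_rotations_and_flips, hr, pvOrients, List.foldl_cons, List.foldl_nil]

theorem pvB_fold (shape : List (Int × Int)) :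
    get_shape_rotations_and_flips_alt shape
      = (pvTransforms.map (fun t => pvNormB (shape.map t))).foldl
          (fun variants o => if o ∈ variants then variants else variants ++ [o]) [] := rfl

-- composing two pointwise-equal maps inside pvNormA
theorem pv_map_comp (f g : (Int × Int) → (Int × Int)) (h : (Int × Int) → (Int × Int))
    (hfg : ∀ p, f (g p) = h p) (s : List (Int × Int)) :
    (s.map g).map f = s.map h := by
  rw [List.map_map]
  exact List.map_congr_left (fun p _ => hfg p)

theorem pv_orients_eq (shape : List (Int × Int)) :
    pvOrients shape = pvTransforms.map (fun t => pvNormB (shape.map t)) := by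
  have hflip := pvNormA_map_norm (fun p => (p.1, -p.2)) (by intro p q; simp; ring) 
  have hrot := pvNormA_map_norm (fun p => (p.2, -p.1)) (by intro p q; simp; ring)
  -- named oriented shapes, each reduced to pvNormA (shape.map tᵢ)
  have e0 : pvNormA shape = pvNormA (shape.map (fun p => (p.1, p.2))) := by simp
  have e2 : pvRot90A (pvNormA shape) = pvNormA (shape.map (fun p => (p.2, -p.1))) := by
    unfold pvRot90A; exact hrot shape
  have e1 : pvFlipA (pvNormA shape) = pvNormA (shape.map (fun p => (p.1, -p.2))) := by
    unfold pvFlipA; exact hflip shape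
  have e3 : pvFlipA (pvRot90A (pvNormA shape)) = pvNormA (shape.map (fun p => (p.2, p.1))) := by
    rw [e2]
    unfold pvFlipA
    rw [hflip (shape.map (fun p => (p.2, -p.1))),
        pv_map_comp _ _ (fun p => (p.2, p.1)) (by intro p; simp) shape]
  have e4 : pvRot90A (pvRot90A (pvNormA shape)) = pvNormA (shape.map (fun p => (-p.1, -p.2))) := by
    rw [e2]
    unfold pvRot90A
    rw [hrot (shape.map (fun p => (p.2, -p.1))),
        pv_map_comp _ _ (fun p => (-p.1, -p.2)) (by intro p; simp) shape]
  have e5 : pvFlipA (pvRot90A (pvRot90A (pvNormA shape)))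
      = pvNormA (shape.map (fun p => (-p.1, p.2))) := by
    rw [e4]
    unfold pvFlipA
    rw [hflip (shape.map (fun p => (-p.1, -p.2))),
        pv_map_comp _ _ (fun p => (-p.1, p.2)) (by intro p; simp) shape]
  have e6 : pvRot90A (pvRot90A (pvRot90A (pvNormA shape)))
      = pvNormA (shape.map (fun p => (-p.2, p.1))) := by
    rw [e4]
    unfold pvRot90A
    rw [hrot (shape.map (fun p => (-p.1, -p.2))),
        pv_map_comp _ _ (fun p => (-p.2, p.1)) (by intro p; simp) shape]
  have e7 : pvFlipA (pvRot90A (pvRot90A (pvRot90A (pvNormA shape))))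
      = pvNormA (shape.map (fun p => (-p.2, -p.1))) := by
    rw [e6]
    unfold pvFlipA
    rw [hflip (shape.map (fun p => (-p.2, p.1))),
        pv_map_comp _ _ (fun p => (-p.2, -p.1)) (by intro p; simp) shape]
  unfold pvOrients pvTransforms
  simp only [List.map_cons, List.map_nil, pvNormB_eq]
  rw [e7, e6, e5, e4, e3, e2, e1, e0]

-- ===== VERDICT (by name: the statement is the Claim_ definition above) =====
theorem get_shape_rotations_and_flips_spec : Claim_equal_get_shape_rotations_and_flips := by
  intro shape _ _
  unfold Spec_get_shape_rotations_and_flips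
  rw [pvA_fold, pvB_fold, ← pv_orients_eq]
  exact pv_dedup_loop (pvOrients shape) _ [] (by simp [PySem.Set.empty])
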